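-- pv_equiv track=rewrite | github.com/valdirgp/UMAGDAqt | Model/GraphPage/GraphsModule.py | get_measure
-- ===== SOURCE A (Python) =====
-- def get_measure(plot_type):
--     nt_unit = {'dH','H','Reference-H','dZ','Z','Reference-Z','dF','F','Reference-F','dG','G','Reference-G','dX','X','Reference-X','dY','Y','Reference-Y'}
--     deg_unit = {'dD','D','Reference-D','dI','I','Reference-I'}
--
--     has_nt = any(type in nt_unit for type in plot_type)
--     has_deg = any(type in deg_unit for type in plot_type)
--
--     if has_nt and has_deg: return 'Undefined'
--     if has_nt: return 'nT'
--     if has_deg: return 'Deg'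
-- ===== SOURCE B (Python) =====
-- def get_measure(plot_type):
--     unit_of = {'dH':'nT','H':'nT','Reference-H':'nT','dZ':'nT','Z':'nT','Reference-Z':'nT',
--                'dF':'nT','F':'nT','Reference-F':'nT','dG':'nT','G':'nT','Reference-G':'nT',
--                'dX':'nT','X':'nT','Reference-X':'nT','dY':'nT','Y':'nT','Reference-Y':'nT',
--                'dD':'Deg','D':'Deg','Reference-D':'Deg','dI':'Deg','I':'Deg','Reference-I':'Deg'}
--     has_nt = False
--     has_deg = False
--     for x in plot_type:
--         u = unit_of.get(x)
--         if u == 'nT':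
--             has_nt = True
--         elif u == 'Deg':
--             has_deg = True
--         if has_nt and has_deg:
--             return 'Undefined'
--     if has_nt:
--         return 'nT'
--     if has_deg:
--         return 'Deg'
--     return None
-- ===== Notes on version B (the rewrite author's own statement) =====
-- stated objective: alternative
-- what changed: A scans the whole list twice with two separate any(...) membership tests over two sets; B makes a single pass with a string-to-unit dict lookup per element, maintaining two flags and returning 'Undefined' early as soon as both units are seen.
import Mathlib
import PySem

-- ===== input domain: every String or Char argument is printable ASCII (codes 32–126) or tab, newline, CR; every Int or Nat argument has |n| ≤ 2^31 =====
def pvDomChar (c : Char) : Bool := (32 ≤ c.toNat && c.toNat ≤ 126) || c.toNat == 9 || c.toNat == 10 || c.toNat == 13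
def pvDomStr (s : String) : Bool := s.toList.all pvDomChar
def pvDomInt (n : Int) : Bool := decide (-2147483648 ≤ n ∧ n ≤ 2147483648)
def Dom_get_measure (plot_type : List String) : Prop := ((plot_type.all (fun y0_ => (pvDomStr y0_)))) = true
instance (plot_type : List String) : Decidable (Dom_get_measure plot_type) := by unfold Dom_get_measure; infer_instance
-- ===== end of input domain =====

-- B replaces A's two full any(...) scans with one pass over a string→unit dict,
-- maintaining two flags and returning 'Undefined' early; objective: alternative.

-- ===== PORT A =====
def ntUnitA : PySem.Set String := PySem.Set.ofList ["dH","H","Reference-H","dZ","Z","Reference-Z","dF","F","Reference-F","dG","G","Reference-G","dX","X","Reference-X","dY","Y","Reference-Y"]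
def degUnitA : PySem.Set String := PySem.Set.ofList ["dD","D","Reference-D","dI","I","Reference-I"]

def get_measure (plot_type : List String) : Option String :=
  let has_nt := plot_type.any (fun t => PySem.Set.contains ntUnitA t)
  let has_deg := plot_type.any (fun t => PySem.Set.contains degUnitA t)
  if has_nt && has_deg then some "Undefined"
  else if has_nt then some "nT"
  else if has_deg then some "Deg"
  else none

-- ===== PORT B =====
def unitOf : PySem.Dict String String := PySem.Dict.ofList
  [("dH","nT"),("H","nT"),("Reference-H","nT"),("dZ","nT"),("Z","nT"),("Reference-Z","nT"),
   ("dF","nT"),("F","nT"),("Reference-F","nT"),("dG","nT"),("G","nT"),("Reference-G","nT"),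
   ("dX","nT"),("X","nT"),("Reference-X","nT"),("dY","nT"),("Y","nT"),("Reference-Y","nT"),
   ("dD","Deg"),("D","Deg"),("Reference-D","Deg"),("dI","Deg"),("I","Deg"),("Reference-I","Deg")]

-- the for-loop with its two flags and the early 'return Undefined'
def measureLoop : List String → Bool → Bool → Option String
  | [], has_nt, has_deg =>
      if has_nt then some "nT"
      else if has_deg then some "Deg"
      else none
  | x :: rest, has_nt, has_deg =>
      let u := PySem.Dict.get? unitOf x
      let flags :=
        if u == some "nT" then (true, has_deg)
        else if u == some "Deg" then (has_nt, true)
        else (has_nt, has_deg)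
      if flags.1 && flags.2 then some "Undefined"
      else measureLoop rest flags.1 flags.2

def get_measure_alt (plot_type : List String) : Option String :=
  measureLoop plot_type false false

-- ===== PRECONDITION & SPEC =====
def Spec_get_measure (plot_type : List String) (out : Option String) : Prop := out = get_measure_alt plot_type
instance (plot_type : List String) (out : Option String) : Decidable (Spec_get_measure plot_type out) := by unfold Spec_get_measure; infer_instance

-- ===== CLAIM (what is proved, stated in full; the proofs are below) =====
def Claim_equal_get_measure : Prop := ∀ (plot_type : List String), Dom_get_measure plot_type → Spec_get_measure plot_type (get_measure plot_type)

-- ===== LEMMAS AND PROOFS =====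

theorem unit_of_nt (x : String) (h : PySem.Set.contains ntUnitA x = true) :
    PySem.Dict.get? unitOf x = some "nT" := by
  have h' : x ∈ (["dH","H","Reference-H","dZ","Z","Reference-Z","dF","F","Reference-F","dG","G","Reference-G","dX","X","Reference-X","dY","Y","Reference-Y"] : List String) := by
    simpa [ntUnitA, PySem.Set.contains, PySem.Set.mem_ofList] using h
  fin_cases h' <;> decide

theorem unit_of_deg (x : String) (h : PySem.Set.contains degUnitA x = true) :
    PySem.Dict.get? unitOf x = some "Deg" := by
  have h' : x ∈ (["dD","D","Reference-D","dI","I","Reference-I"] : List String) := by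
    simpa [degUnitA, PySem.Set.contains, PySem.Set.mem_ofList] using h
  fin_cases h' <;> decide

theorem unit_of_none (x : String)
    (h1 : PySem.Set.contains ntUnitA x = false)
    (h2 : PySem.Set.contains degUnitA x = false) :
    PySem.Dict.get? unitOf x = none := by
  rw [PySem.Dict.get?_eq_none_iff_not_mem_keys]
  have hkeys : unitOf.keys = ["dH","H","Reference-H","dZ","Z","Reference-Z","dF","F","Reference-F","dG","G","Reference-G","dX","X","Reference-X","dY","Y","Reference-Y","dD","D","Reference-D","dI","I","Reference-I"] := by decide
  rw [hkeys]
  simp [ntUnitA, PySem.Set.contains] at h1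
  simp [degUnitA, PySem.Set.contains] at h2
  simp [h1, h2]

theorem nt_not_deg (x : String) (h : PySem.Set.contains ntUnitA x = true) :
    PySem.Set.contains degUnitA x = false := by
  have h' : x ∈ (["dH","H","Reference-H","dZ","Z","Reference-Z","dF","F","Reference-F","dG","G","Reference-G","dX","X","Reference-X","dY","Y","Reference-Y"] : List String) := by
    simpa [ntUnitA, PySem.Set.contains, PySem.Set.mem_ofList] using h
  fin_cases h' <;> decide

theorem measureLoop_eq (l : List String) (nt deg : Bool) (h : (nt && deg) = false) :
    measureLoop l nt deg =
      (if (nt || l.any (fun t => PySem.Set.contains ntUnitA t)) &&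
          (deg || l.any (fun t => PySem.Set.contains degUnitA t)) then some "Undefined"
       else if nt || l.any (fun t => PySem.Set.contains ntUnitA t) then some "nT"
       else if deg || l.any (fun t => PySem.Set.contains degUnitA t) then some "Deg"
       else none) := by
  induction l generalizing nt deg with
  | nil => cases nt <;> cases deg <;> simp_all [measureLoop]
  | cons x rest ih =>
    simp only [measureLoop, List.any_cons]
    by_cases h1 : PySem.Set.contains ntUnitA x = true
    · have hd := nt_not_deg x h1
      rw [unit_of_nt x h1]
      cases deg
      · cases nt <;> simp_all [ih true false rfl]
      · simp_all
    · have h1f : PySem.Set.contains ntUnitA x = false := by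
        cases hc : PySem.Set.contains ntUnitA x <;> simp_all
      by_cases h2 : PySem.Set.contains degUnitA x = true
      · rw [unit_of_deg x h2]
        cases nt
        · cases deg <;> simp_all [ih false true rfl]
        · simp_all
      · have h2f : PySem.Set.contains degUnitA x = false := by
          cases hc : PySem.Set.contains degUnitA x <;> simp_all
        rw [unit_of_none x h1f h2f]
        cases nt <;> cases deg <;>
          simp_all [ih false false rfl, ih true false rfl, ih false true rfl]

-- ===== VERDICT (by name: the statement is the Claim_ definition above) =====
theorem get_measure_spec : Claim_equal_get_measure := by
  intro l _
  unfold Spec_get_measure get_measure get_measure_alt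
  rw [measureLoop_eq _ _ _ rfl]
  simp
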